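-- pv_equiv track=rewrite | github.com/grzegorzmichrowski/ERP | hr/hr.py | get_oldest_person
-- ===== SOURCE A (Python) =====
-- NAME_INDEX = 2
--
-- AGE_INDEX = 3
--
-- def get_oldest_person(table):
--     lowest_year = table[0][AGE_INDEX]
--     for t in table:
--         if t[AGE_INDEX] < lowest_year:
--             lowest_year = t[AGE_INDEX]
--     oldest_people = []
--     for t in table:
--         if t[AGE_INDEX] == lowest_year:
--             oldest_people.append(t[NAME_INDEX])
--     return oldest_people
-- ===== SOURCE B (Python) =====
-- def get_oldest_person(table):
--     AGE_INDEX = 3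
--     NAME_INDEX = 2
--     lowest = table[0][AGE_INDEX]
--     oldest_people = []
--     for t in table:
--         a = t[AGE_INDEX]
--         if a < lowest:
--             lowest = a
--             oldest_people = [t[NAME_INDEX]]
--         elif a == lowest:
--             oldest_people.append(t[NAME_INDEX])
--     return oldest_people
-- ===== Notes on version B (the rewrite author's own statement) =====
-- stated objective: alternative
-- what changed: Fuses A's two passes (find minimum age string, then collect matching names) into a single accumulating scan that resets the collected names whenever a strictly smaller age is seen.
import Mathlib
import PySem

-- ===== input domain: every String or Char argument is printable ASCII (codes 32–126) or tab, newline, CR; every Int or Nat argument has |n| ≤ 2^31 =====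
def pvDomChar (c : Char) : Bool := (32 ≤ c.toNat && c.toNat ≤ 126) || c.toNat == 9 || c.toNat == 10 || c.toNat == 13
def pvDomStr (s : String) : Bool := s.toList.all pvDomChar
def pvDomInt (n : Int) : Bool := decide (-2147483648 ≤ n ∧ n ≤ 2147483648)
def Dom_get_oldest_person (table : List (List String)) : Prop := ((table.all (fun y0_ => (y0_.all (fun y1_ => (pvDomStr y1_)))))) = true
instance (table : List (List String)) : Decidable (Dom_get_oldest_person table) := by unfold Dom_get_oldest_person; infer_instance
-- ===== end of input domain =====

-- B fuses A's two passes (min-finding, then collecting) into one accumulating scan; same O(n) cost, different decomposition.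

-- ===== PORT A =====
-- t[AGE_INDEX]/t[NAME_INDEX]: under Pre_ every row has length ≥ 4, so getD's default is never used (exact there).
def get_oldest_person (table : List (List String)) : List String :=
  let lowest_year :=
    table.foldl (fun low t => if t.getD 3 "" < low then t.getD 3 "" else low)
      ((table.headD []).getD 3 "")
  table.foldl (fun acc t => if t.getD 3 "" == lowest_year then acc ++ [t.getD 2 ""] else acc) []

-- ===== PORT B =====
def get_oldest_person_alt (table : List (List String)) : List String :=
  (table.foldl
    (fun (s : String × List String) t =>
      let a := t.getD 3 ""
      if a < s.1 then (a, [t.getD 2 ""])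
      else if a == s.1 then (s.1, s.2 ++ [t.getD 2 ""])
      else s)
    (((table.headD []).getD 3 ""), [])).2

-- ===== PRECONDITION & SPEC =====
-- Pre_: exactly where Python A returns (table[0] needs a nonempty table; t[3] needs each row of length ≥ 4).
def Pre_get_oldest_person (table : List (List String)) : Prop :=
  table ≠ [] ∧ ∀ r ∈ table, 4 ≤ r.length
instance (table : List (List String)) : Decidable (Pre_get_oldest_person table) := by
  unfold Pre_get_oldest_person; infer_instance
def pvWitness_get_oldest_person : List (List String) := [["x", "y", "Bob", "1990"], ["x", "y", "Ann", "1985"]]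
def Spec_get_oldest_person (table : List (List String)) (out : List String) : Prop := out = get_oldest_person_alt table
instance (table : List (List String)) (out : List String) : Decidable (Spec_get_oldest_person table out) := by unfold Spec_get_oldest_person; infer_instance

-- ===== CLAIM (what is proved, stated in full; the proofs are below) =====
def Claim_equal_get_oldest_person : Prop := ∀ (table : List (List String)), Dom_get_oldest_person table → Pre_get_oldest_person table → Spec_get_oldest_person table (get_oldest_person table)

-- ===== LEMMAS AND PROOFS =====

def pvKey (t : List String) : String := t.getD 3 ""
def pvName (t : List String) : String := t.getD 2 ""

def pvRunMin (l : String) (xs : List (List String)) : String :=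
  xs.foldl (fun low t => if pvKey t < low then pvKey t else low) l

def pvStepB (s : String × List String) (t : List String) : String × List String :=
  if pvKey t < s.1 then (pvKey t, [pvName t])
  else if pvKey t == s.1 then (s.1, s.2 ++ [pvName t]) else s

theorem pvRunMin_le (xs : List (List String)) (l : String) : pvRunMin l xs ≤ l := by
  induction xs generalizing l with
  | nil => exact le_refl _
  | cons t xs ih =>
    simp only [pvRunMin, List.foldl_cons] at *
    split
    · exact le_trans (ih _) (le_of_lt (by assumption))
    · exact ih _

theorem pvCollect_eq (xs : List (List String)) (m : String) (acc : List String) :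
    xs.foldl (fun acc t => if pvKey t == m then acc ++ [pvName t] else acc) acc
      = acc ++ (xs.filter (fun t => pvKey t == m)).map pvName := by
  induction xs generalizing acc with
  | nil => simp
  | cons t xs ih =>
    by_cases h : (pvKey t == m) = true
    · rw [List.foldl_cons, if_pos h, ih,
        List.filter_cons_of_pos (p := fun u => pvKey u == m) h]
      simp
    · rw [List.foldl_cons, if_neg h, ih,
        List.filter_cons_of_neg (p := fun u => pvKey u == m) h]

theorem pvFoldB_eq (xs : List (List String)) (l : String) (acc : List String) :
    xs.foldl pvStepB (l, acc)
    = (pvRunMin l xs,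
       (if pvRunMin l xs = l then acc else [])
         ++ (xs.filter (fun t => pvKey t == pvRunMin l xs)).map pvName) := by
  induction xs generalizing l acc with
  | nil => simp [pvRunMin]
  | cons t xs ih =>
    by_cases hlt : pvKey t < l
    · have hm : pvRunMin l (t :: xs) = pvRunMin (pvKey t) xs := by
        show pvRunMin (if pvKey t < l then pvKey t else l) xs = _
        rw [if_pos hlt]
      have hne : ¬ pvRunMin (pvKey t) xs = l :=
        ne_of_lt (lt_of_le_of_lt (pvRunMin_le xs _) hlt)
      rw [List.foldl_cons,
        show pvStepB (l, acc) t = (pvKey t, [pvName t]) from by simp [pvStepB, hlt],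
        ih, hm, if_neg hne]
      by_cases he : pvKey t = pvRunMin (pvKey t) xs
      · rw [List.filter_cons_of_pos (p := fun u => pvKey u == pvRunMin (pvKey t) xs)
          (by rw [← he]; simp), ← he]
        simp
      · rw [List.filter_cons_of_neg (p := fun u => pvKey u == pvRunMin (pvKey t) xs)
          (by simp [he]), if_neg (fun h => he h.symm)]
    · have hm : pvRunMin l (t :: xs) = pvRunMin l xs := by
        show pvRunMin (if pvKey t < l then pvKey t else l) xs = _
        rw [if_neg hlt]
      by_cases heq : pvKey t = l
      · rw [List.foldl_cons,
          show pvStepB (l, acc) t = (l, acc ++ [pvName t]) from by simp [pvStepB, heq],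
          ih, hm]
        by_cases hml : pvRunMin l xs = l
        · rw [List.filter_cons_of_pos (p := fun u => pvKey u == pvRunMin l xs)
            (by simp [heq, hml])]
          simp [hml]
        · rw [List.filter_cons_of_neg (p := fun u => pvKey u == pvRunMin l xs)
            (by simp only [heq, beq_iff_eq]; exact fun h => hml h.symm)]
          simp [hml]
      · have hgt : ¬ pvKey t = pvRunMin l xs := by
          intro h
          exact heq (le_antisymm (h ▸ pvRunMin_le xs l) (not_lt.mp hlt))
        rw [List.foldl_cons,
          show pvStepB (l, acc) t = (l, acc) from by
            unfold pvStepB; rw [if_neg hlt, if_neg (by simpa using heq)],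
          ih, hm, List.filter_cons_of_neg (p := fun u => pvKey u == pvRunMin l xs)
            (by simp only [beq_iff_eq]; exact hgt)]

-- ===== VERDICT (by name: the statement is the Claim_ definition above) =====
theorem get_oldest_person_spec : Claim_equal_get_oldest_person := by
  intro table _ _
  unfold Spec_get_oldest_person
  cases table with
  | nil => rfl
  | cons t xs =>
    have e1 : get_oldest_person (t :: xs)
        = (t :: xs).foldl
            (fun acc u => if pvKey u == pvRunMin (pvKey t) (t :: xs) then acc ++ [pvName u] else acc)
            [] := rfl
    have e2 : get_oldest_person_alt (t :: xs)
        = ((t :: xs).foldl pvStepB (pvKey t, [])).2 := rfl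
    rw [e1, e2, pvCollect_eq, pvFoldB_eq]
    simp
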